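-- pv_equiv track=rewrite | github.com/chelseaChen0104/world_model_termination_spa | scripts/sudoku4_env.py | render_state_b5
-- ===== SOURCE A (Python) =====
-- from typing import Optional, List, Tuple
--
-- GRID_N = 4
--
-- def render_state_b5(grid: List[List[int]]) -> str:
--     """Render grid in the EXACT format rl_b5 saw during SFT training.
--
--     Format (verified from data/sudoku_4x4_llm_policy_minimal_spa_scale samples):
--         3 2 | 1 4
--         1 . | 3 .
--         ---------
--         . . | 2 1
--         . 1 | . 3
--
--     Empty cells are '.'; values 1-4 shown as digits; ' | ' between col 1-2 and
--     col 3-4 of each row; '---------' line between row 2 and row 3 of the grid.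
--     Note: NO 'Current state:' prefix (the user message appends that).
--     """
--     def cell(v: int) -> str:
--         return "." if v == 0 else str(v)
--
--     rows = []
--     for r in range(GRID_N):
--         left = " ".join(cell(grid[r][c]) for c in (0, 1))
--         right = " ".join(cell(grid[r][c]) for c in (2, 3))
--         rows.append(f"{left} | {right}")
--     # Insert horizontal separator between row 1 and row 2 (after the top 2x2 box)
--     rows.insert(2, "-" * 9)
--     return "\n".join(rows)
-- ===== SOURCE B (Python) =====
-- from typing import List
--
-- GRID_N = 4
--
-- _TEMPLATE = (
--     "{} {} | {} {}\n"
--     "{} {} | {} {}\n"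
--     "---------\n"
--     "{} {} | {} {}\n"
--     "{} {} | {} {}"
-- )
--
-- def render_state_b5(grid: List[List[int]]) -> str:
--     cells = ["." if v == 0 else str(v) for row in grid[:GRID_N] for v in row[:GRID_N]]
--     return _TEMPLATE.format(*cells)
-- ===== Notes on version B (the rewrite author's own statement) =====
-- stated objective: simpler
-- what changed: Replaces the per-row loop with left/right half joins and the list.insert of the separator by a single flat map of the 16 cells substituted into one fixed multi-line template.
import Mathlib
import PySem

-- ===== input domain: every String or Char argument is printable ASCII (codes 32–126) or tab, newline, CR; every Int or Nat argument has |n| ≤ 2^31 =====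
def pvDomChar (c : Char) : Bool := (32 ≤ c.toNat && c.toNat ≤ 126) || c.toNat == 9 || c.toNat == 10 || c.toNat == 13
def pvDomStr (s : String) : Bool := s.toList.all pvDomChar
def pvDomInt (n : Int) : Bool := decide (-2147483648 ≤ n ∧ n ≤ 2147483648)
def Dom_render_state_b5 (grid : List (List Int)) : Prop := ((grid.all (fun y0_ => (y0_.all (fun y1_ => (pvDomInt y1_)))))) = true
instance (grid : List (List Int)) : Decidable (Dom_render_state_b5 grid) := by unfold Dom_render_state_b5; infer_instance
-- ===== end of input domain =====

-- B renders the same grid by flat-mapping the 16 cells and substituting them into one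
-- fixed template (no per-row loop, no list.insert of the separator); equivalence is on
-- the return value; Pre_ excludes only grids on which A raises IndexError.

-- ===== PORT A =====
-- cell(v): "." if v == 0 else str(v)
def pvCellA (v : Int) : String := if v == 0 then "." else PySem.Int.toStr v

-- literal transliteration: loop r in range(4), join halves, append f"{left} | {right}",
-- then rows.insert(2, "-"*9) and "\n".join(rows).  grid[r][c] is pyGetD (in range under Pre_).
def render_state_b5 (grid : List (List Int)) : String :=
  let rows := (PySem.List.pyRange 0 4 1).foldl (fun rows r =>
      let left := PySem.Str.join " " ([(0 : Int), 1].map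
        (fun c => pvCellA (PySem.List.pyGetD (PySem.List.pyGetD grid r []) c 0)))
      let right := PySem.Str.join " " ([(2 : Int), 3].map
        (fun c => pvCellA (PySem.List.pyGetD (PySem.List.pyGetD grid r []) c 0)))
      rows ++ [left ++ " | " ++ right]) []
  let rows := PySem.List.insert rows 2 "---------"
  PySem.Str.join "\n" rows

-- ===== PORT B =====
def pvCellB (v : Int) : String := if v == 0 then "." else PySem.Int.toStr v

-- flat 16-cell list from grid[:4] × row[:4], substituted into the fixed template;
-- str.format raises when fewer than 16 cells arrive (outside Pre_), ported as "".
def render_state_b5_alt (grid : List (List Int)) : String :=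
  let cells := ((grid.take 4).map (fun row => (row.take 4).map pvCellB)).flatten
  match cells with
  | [c0, c1, c2, c3, c4, c5, c6, c7, c8, c9, c10, c11, c12, c13, c14, c15] =>
      c0 ++ " " ++ c1 ++ " | " ++ c2 ++ " " ++ c3 ++ "\n" ++
      c4 ++ " " ++ c5 ++ " | " ++ c6 ++ " " ++ c7 ++ "\n" ++
      "---------\n" ++
      c8 ++ " " ++ c9 ++ " | " ++ c10 ++ " " ++ c11 ++ "\n" ++
      c12 ++ " " ++ c13 ++ " | " ++ c14 ++ " " ++ c15
  | _ => ""

-- ===== PRECONDITION & SPEC =====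
-- Pre_ excludes exactly the grids on which A raises IndexError (fewer than 4 rows,
-- or one of the first 4 rows shorter than 4).
def Pre_render_state_b5 (grid : List (List Int)) : Prop :=
  4 ≤ grid.length ∧ ∀ row ∈ grid.take 4, 4 ≤ row.length
instance (grid : List (List Int)) : Decidable (Pre_render_state_b5 grid) := by
  unfold Pre_render_state_b5; infer_instance
def pvWitness_render_state_b5 : List (List Int) :=
  [[1, 2, 3, 4], [0, 0, 0, 0], [4, 3, 2, 1], [0, 1, 0, 2]]
def Spec_render_state_b5 (grid : List (List Int)) (out : String) : Prop := out = render_state_b5_alt grid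
instance (grid : List (List Int)) (out : String) : Decidable (Spec_render_state_b5 grid out) := by unfold Spec_render_state_b5; infer_instance

-- ===== CLAIM (what is proved, stated in full; the proofs are below) =====
def Claim_equal_render_state_b5 : Prop := ∀ (grid : List (List Int)), Dom_render_state_b5 grid → Pre_render_state_b5 grid → Spec_render_state_b5 grid (render_state_b5 grid)

-- ===== LEMMAS AND PROOFS =====

-- joining the four row strings (with the separator inserted) equals B's flat template
theorem pvJoins (s0 s1 s2 s3 s4 s5 s6 s7 s8 s9 s10 s11 s12 s13 s14 s15 : String) :
    PySem.Str.join "\n" [PySem.Str.join " " [s0, s1] ++ " | " ++ PySem.Str.join " " [s2, s3],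
      PySem.Str.join " " [s4, s5] ++ " | " ++ PySem.Str.join " " [s6, s7],
      "---------",
      PySem.Str.join " " [s8, s9] ++ " | " ++ PySem.Str.join " " [s10, s11],
      PySem.Str.join " " [s12, s13] ++ " | " ++ PySem.Str.join " " [s14, s15]]
    = s0 ++ " " ++ s1 ++ " | " ++ s2 ++ " " ++ s3 ++ "\n" ++
      s4 ++ " " ++ s5 ++ " | " ++ s6 ++ " " ++ s7 ++ "\n" ++
      "---------\n" ++
      s8 ++ " " ++ s9 ++ " | " ++ s10 ++ " " ++ s11 ++ "\n" ++
      s12 ++ " " ++ s13 ++ " | " ++ s14 ++ " " ++ s15 := by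
  apply String.toList_inj.mp
  simp [PySem.Str.join, PySem.Chars.join, List.intercalate, List.intersperse]

-- A = B on any grid of shape (4 rows of ≥ 4 cells, plus anything beyond)
theorem pvMain (a b c d e f g h i j k l m n o p : Int) (t0 t1 t2 t3 : List Int)
    (rest : List (List Int)) :
    render_state_b5 ((a::b::c::d::t0)::(e::f::g::h::t1)::(i::j::k::l::t2)::(m::n::o::p::t3)::rest)
    = render_state_b5_alt ((a::b::c::d::t0)::(e::f::g::h::t1)::(i::j::k::l::t2)::(m::n::o::p::t3)::rest) := by
  have hr : PySem.List.pyRange 0 4 1 = [0, 1, 2, 3] := by decide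
  have hcell : pvCellB = pvCellA := rfl
  simp only [render_state_b5, render_state_b5_alt, hr, List.foldl, List.map,
    PySem.List.pyGetD_ofNat', List.getD, List.getElem?_cons_succ, List.getElem?_cons_zero,
    Option.getD_some, List.take, List.flatten, List.nil_append, List.cons_append, hcell]
  rw [PySem.List.insert_ofNat _ 2 _ (by simp)]
  simp only [List.take, List.drop]
  exact pvJoins _ _ _ _ _ _ _ _ _ _ _ _ _ _ _ _

-- ===== VERDICT (by name: the statement is the Claim_ definition above) =====
theorem render_state_b5_spec : Claim_equal_render_state_b5 := by
  intro grid _ hpre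
  obtain ⟨hlen, hrows⟩ := hpre
  rcases grid with _ | ⟨r0, _ | ⟨r1, _ | ⟨r2, _ | ⟨r3, rest⟩⟩⟩⟩ <;> simp at hlen
  have h0 : 4 ≤ r0.length := hrows r0 (by simp)
  have h1 : 4 ≤ r1.length := hrows r1 (by simp)
  have h2 : 4 ≤ r2.length := hrows r2 (by simp)
  have h3 : 4 ≤ r3.length := hrows r3 (by simp)
  rcases r0 with _ | ⟨a, _ | ⟨b, _ | ⟨c, _ | ⟨d, t0⟩⟩⟩⟩ <;> simp at h0
  rcases r1 with _ | ⟨e, _ | ⟨f, _ | ⟨g, _ | ⟨h, t1⟩⟩⟩⟩ <;> simp at h1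
  rcases r2 with _ | ⟨i, _ | ⟨j, _ | ⟨k, _ | ⟨l, t2⟩⟩⟩⟩ <;> simp at h2
  rcases r3 with _ | ⟨m, _ | ⟨n, _ | ⟨o, _ | ⟨p, t3⟩⟩⟩⟩ <;> simp at h3
  show render_state_b5 _ = render_state_b5_alt _
  exact pvMain a b c d e f g h i j k l m n o p t0 t1 t2 t3 rest
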